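-- pv_equiv track=rewrite | github.com/tdunn1/AlgorithmPractice | bubble_swap.py | bubble_swap
-- ===== SOURCE A (Python) =====
-- def bubble_swap(s:str, i:int, j:int):
--     string = list(s)
--
--     while i>0:
--         string = string[1:] + string[:1]
--         i -= 1
--
--     #move first two characters reversed at end of string
--     string = string[:1] + string[2:] + string[1:2]
--     string = string[1:] + string[:1]
--
--     #to original positions
--     while len(string) > j + 1:
--         string = string[1:] + string[:1]
--         j += 1
--
--     return ''.join(string)
-- ===== SOURCE B (Python) =====
-- def bubble_swap(s: str, i: int, j: int):
--     n = len(s)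
--     if n == 0:
--         return s
--     chars = list(s)
--     r = max(i, 0) % n
--     t = chars[r:] + chars[:r]
--     u = t[:1] + t[2:] + t[1:2]
--     k = (1 + max(0, n - 1 - j)) % n
--     return ''.join(u[k:] + u[:k])
-- ===== Notes on version B (the rewrite author's own statement) =====
-- stated objective: faster
-- what changed: A performs every rotation one character at a time (i steps, then up to n-1-j more); B computes the two net rotation offsets modulo len(s) in closed form and builds the result with three slices.
import Mathlib
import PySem

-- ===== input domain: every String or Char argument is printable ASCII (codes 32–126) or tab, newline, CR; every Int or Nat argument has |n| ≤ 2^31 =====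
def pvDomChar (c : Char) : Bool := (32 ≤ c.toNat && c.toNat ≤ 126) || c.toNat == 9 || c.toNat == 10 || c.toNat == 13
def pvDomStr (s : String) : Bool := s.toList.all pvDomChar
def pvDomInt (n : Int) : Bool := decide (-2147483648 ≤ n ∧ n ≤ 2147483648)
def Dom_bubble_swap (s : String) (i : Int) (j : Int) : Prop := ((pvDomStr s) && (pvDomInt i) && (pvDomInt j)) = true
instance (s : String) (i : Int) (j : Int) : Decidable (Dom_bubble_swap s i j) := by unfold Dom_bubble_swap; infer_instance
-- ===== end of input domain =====

-- B replaces A's repeated one-step rotations by a closed-form modular rotation computed once; return value only (neither side mutates its arguments).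

-- ===== PORT A =====
-- string[1:] + string[:1] (one left-rotation step), exactly as A writes it
def bsRotOnce (l : List Char) : List Char :=
  PySem.List.slice l (some 1) none ++ PySem.List.slice l none (some 1)

-- needed by the termination argument of bsLoop2 below
theorem bsRotOnce_length (l : List Char) : (bsRotOnce l).length = l.length := by
  rw [bsRotOnce, PySem.List.slice_from_one l, PySem.List.slice_to l (by norm_num : (0:Int) ≤ 1)]
  simp
  omega

-- while i > 0: string = string[1:] + string[:1]; i -= 1
def bsLoop1 (l : List Char) (i : Int) : List Char :=
  if 0 < i then bsLoop1 (bsRotOnce l) (i - 1) else l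
termination_by i.toNat
decreasing_by omega

-- while len(string) > j + 1: string = string[1:] + string[:1]; j += 1
def bsLoop2 (l : List Char) (j : Int) : List Char :=
  if (l.length : Int) > j + 1 then bsLoop2 (bsRotOnce l) (j + 1) else l
termination_by ((l.length : Int) - 1 - j).toNat
decreasing_by simp only [bsRotOnce_length]; omega

def bubble_swap (s : String) (i : Int) (j : Int) : String :=
  let string := s.toList
  let string := bsLoop1 string i
  -- string = string[:1] + string[2:] + string[1:2]
  let string := PySem.List.slice string none (some 1) ++ PySem.List.slice string (some 2) none
      ++ PySem.List.slice string (some 1) (some 2)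
  -- string = string[1:] + string[:1]
  let string := PySem.List.slice string (some 1) none ++ PySem.List.slice string none (some 1)
  let string := bsLoop2 string j
  String.ofList string

-- ===== PORT B =====
def bubble_swap_alt (s : String) (i : Int) (j : Int) : String :=
  let n := s.toList.length
  if n = 0 then s
  else
    let chars := s.toList
    let r := PySem.Int.mod (max i 0) (n : Int)
    let t := PySem.List.slice chars (some r) none ++ PySem.List.slice chars none (some r)
    let u := PySem.List.slice t none (some 1) ++ PySem.List.slice t (some 2) none
        ++ PySem.List.slice t (some 1) (some 2)
    let k := PySem.Int.mod (1 + max 0 ((n : Int) - 1 - j)) (n : Int)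
    String.ofList (PySem.List.slice u (some k) none ++ PySem.List.slice u none (some k))

-- ===== PRECONDITION & SPEC =====
def Spec_bubble_swap (s : String) (i : Int) (j : Int) (out : String) : Prop := out = bubble_swap_alt s i j
instance (s : String) (i : Int) (j : Int) (out : String) : Decidable (Spec_bubble_swap s i j out) := by unfold Spec_bubble_swap; infer_instance

-- ===== CLAIM (what is proved, stated in full; the proofs are below) =====
def Claim_equal_bubble_swap : Prop := ∀ (s : String) (i : Int) (j : Int), Dom_bubble_swap s i j → Spec_bubble_swap s i j (bubble_swap s i j)

-- ===== LEMMAS AND PROOFS =====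

theorem bsRotOnce_eq_rotate (l : List Char) : bsRotOnce l = l.rotate 1 := by
  cases l with
  | nil => rw [bsRotOnce, PySem.List.slice_from_one ([] : List Char),
      PySem.List.slice_to ([] : List Char) (by norm_num : (0:Int) ≤ 1)]
           simp
  | cons a t =>
      rw [List.rotate_eq_drop_append_take (by simp)]
      rw [bsRotOnce, PySem.List.slice_from_one, PySem.List.slice_to _ (by norm_num : (0:Int) ≤ 1)]
      simp

theorem bsLoop1_eq_rotate (l : List Char) (i : Int) : bsLoop1 l i = l.rotate i.toNat := by
  by_cases h : 0 < i
  · rw [bsLoop1, if_pos h, bsLoop1_eq_rotate (bsRotOnce l) (i - 1),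
      bsRotOnce_eq_rotate, List.rotate_rotate]
    congr 1; omega
  · rw [bsLoop1, if_neg h]
    have h0 : i.toNat = 0 := by omega
    simp [h0]
termination_by i.toNat
decreasing_by omega

theorem bsLoop2_eq_rotate (l : List Char) (j : Int) :
    bsLoop2 l j = l.rotate ((l.length : Int) - 1 - j).toNat := by
  by_cases h : (l.length : Int) > j + 1
  · rw [bsLoop2, if_pos h, bsLoop2_eq_rotate (bsRotOnce l) (j + 1),
      bsRotOnce_eq_rotate, List.rotate_rotate]
    simp only [List.length_rotate]
    congr 1; omega
  · rw [bsLoop2, if_neg h]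
    have h0 : ((l.length : Int) - 1 - j).toNat = 0 := by omega
    simp [h0]
termination_by ((l.length : Int) - 1 - j).toNat
decreasing_by simp only [bsRotOnce_length]; omega

-- a pair of slices with an in-range Int bound is a rotation
theorem slice_pair_eq_rotate (l : List Char) (r : Int) (h0 : 0 ≤ r) (h1 : r ≤ (l.length : Int)) :
    PySem.List.slice l (some r) none ++ PySem.List.slice l none (some r) = l.rotate r.toNat := by
  rw [PySem.List.slice_from l h0, PySem.List.slice_to l h0,
    List.rotate_eq_drop_append_take (by omega)]

-- the middle "move char 1 to the end" step preserves length
theorem bsMid_length (l : List Char) :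
    (PySem.List.slice l none (some 1) ++ PySem.List.slice l (some 2) none
      ++ PySem.List.slice l (some 1) (some 2)).length = l.length := by
  rw [PySem.List.slice_to l (by norm_num : (0:Int) ≤ 1),
    PySem.List.slice_from l (by norm_num : (0:Int) ≤ 2),
    PySem.List.slice_toNat l (by norm_num : (0:Int) ≤ 1) (by norm_num : (0:Int) ≤ 2)]
  simp
  omega

theorem bubble_swap_spec_aux (s : String) (i : Int) (j : Int) :
    bubble_swap s i j = bubble_swap_alt s i j := by
  unfold bubble_swap bubble_swap_alt
  by_cases hn : s.toList.length = 0
  · -- empty string: every slice/rotation of [] is [], and B returns s = ""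
    have hl : s.toList = [] := by simpa using hn
    simp only [hl]
    rw [bsLoop1_eq_rotate, List.rotate_nil, bsLoop2_eq_rotate]
    simp [PySem.List.slice]
    have hs : s = "" := by rw [← String.ofList_toList (s := s), hl]
    rw [hs]
  · simp only [if_neg hn]
    have hn' : 0 < s.toList.length := Nat.pos_of_ne_zero hn
    have npos : (0:Int) < (s.toList.length : Int) := by exact_mod_cast hn'
    -- B's first slice pair = A's first loop
    have hr0 := PySem.Int.mod_nonneg (max i 0) npos
    have hr1 := PySem.Int.mod_lt (max i 0) npos
    have hb1 : PySem.List.slice s.toList (some (PySem.Int.mod (max i 0) (s.toList.length : Int))) none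
        ++ PySem.List.slice s.toList none (some (PySem.Int.mod (max i 0) (s.toList.length : Int)))
        = bsLoop1 s.toList i := by
      rw [slice_pair_eq_rotate _ _ hr0 hr1.le, bsLoop1_eq_rotate,
        ← List.rotate_mod s.toList i.toNat]
      congr 1
      have hmax : max i 0 = ((i.toNat : Nat) : Int) := by omega
      rw [PySem.Int.mod_eq_emod_of_pos npos, hmax, ← Int.natCast_mod, Int.toNat_natCast]
    rw [hb1]
    -- both middles are now the same term u
    set u := PySem.List.slice (bsLoop1 s.toList i) none (some 1)
        ++ PySem.List.slice (bsLoop1 s.toList i) (some 2) none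
        ++ PySem.List.slice (bsLoop1 s.toList i) (some 1) (some 2) with hu
    have hul : u.length = s.toList.length := by
      rw [hu, bsMid_length, bsLoop1_eq_rotate, List.length_rotate]
    -- A's trailing rotations vs B's single modular rotation
    have hk0 := PySem.Int.mod_nonneg (1 + max 0 ((s.toList.length : Int) - 1 - j)) npos
    have hk1 := PySem.Int.mod_lt (1 + max 0 ((s.toList.length : Int) - 1 - j)) npos
    rw [slice_pair_eq_rotate u 1 (by norm_num) (by omega),
      slice_pair_eq_rotate u _ hk0 (by omega),
      bsLoop2_eq_rotate, List.length_rotate, List.rotate_rotate,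
      ← List.rotate_mod u]
    congr 1
    rw [hul, PySem.Int.mod_eq_emod_of_pos npos]
    have hmax : 1 + max 0 ((s.toList.length : Int) - 1 - j)
        = (((1 + ((s.toList.length : Int) - 1 - j).toNat : Nat)) : Int) := by omega
    rw [hmax, ← Int.natCast_mod, Int.toNat_natCast]
    norm_num

-- ===== VERDICT (by name: the statement is the Claim_ definition above) =====
theorem bubble_swap_spec : Claim_equal_bubble_swap := by
  intro s i j _
  unfold Spec_bubble_swap
  exact bubble_swap_spec_aux s i j
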